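-- pv_equiv track=rewrite | github.com/iambodha/ChordScribe | Chording/Chorder.py | _apply_qwertz_mapping
-- ===== SOURCE A (Python) =====
-- def _apply_qwertz_mapping(text: str) -> str:
--     """
--     Applies QWERTZ keyboard layout mapping to the given text.
--
--     Args:
--         text: Text to convert
--
--     Returns:
--         Converted text with QWERTZ mappings applied
--     """
--     modified_text = ""
--     for char in text:
--         if char.lower() == 'y':
--             modified_text += 'z' if char.islower() else 'Z'
--         elif char.lower() == 'z':
--             modified_text += 'y' if char.islower() else 'Y'
--         elif char == "'":
--             modified_text += "#"
--         else:
--             modified_text += char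
--     return modified_text
-- ===== SOURCE B (Python) =====
-- def _apply_qwertz_mapping(text: str) -> str:
--     """Apply QWERTZ mapping by staged whole-string replace passes.
--
--     The y<->z and Y<->Z swaps are done with a sentinel character ('\x00',
--     which cannot occur in the printable-ASCII text this is used on)."""
--     s = text.replace('y', '\x00').replace('z', 'y').replace('\x00', 'z')
--     s = s.replace('Y', '\x00').replace('Z', 'Y').replace('\x00', 'Z')
--     return s.replace("'", '#')
-- ===== Notes on version B (the rewrite author's own statement) =====
-- stated objective: faster
-- what changed: Replaced A's single per-character if/elif accumulation pass by seven staged whole-string str.replace passes (each y<->z and Y<->Z case swap done via a sentinel character), with no per-character Python-level branching.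
import Mathlib
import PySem

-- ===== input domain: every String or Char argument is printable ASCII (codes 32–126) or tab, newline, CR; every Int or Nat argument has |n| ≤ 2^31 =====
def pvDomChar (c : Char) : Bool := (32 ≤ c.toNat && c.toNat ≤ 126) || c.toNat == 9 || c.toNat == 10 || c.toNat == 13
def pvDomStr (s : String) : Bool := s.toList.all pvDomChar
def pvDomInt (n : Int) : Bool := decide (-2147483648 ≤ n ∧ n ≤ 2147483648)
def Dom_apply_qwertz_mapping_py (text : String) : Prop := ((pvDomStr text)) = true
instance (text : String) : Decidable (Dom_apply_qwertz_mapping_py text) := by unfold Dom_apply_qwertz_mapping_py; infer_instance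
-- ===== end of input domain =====

-- B replaces A's single per-character if/elif accumulation pass by seven staged
-- whole-string replace passes (each case swap done via a sentinel character).

set_option maxRecDepth 4096
set_option maxHeartbeats 1000000


-- ===== PORT A =====
def apply_qwertz_mapping_py (text : String) : String :=
  text.toList.foldl (fun modified_text char =>
    if PySem.Chars.lowerChar char == 'y' then
      modified_text ++ (if PySem.Chars.islower char then "z" else "Z")
    else if PySem.Chars.lowerChar char == 'z' then
      modified_text ++ (if PySem.Chars.islower char then "y" else "Y")
    else if char == '\'' then
      modified_text ++ "#"
    else
      modified_text ++ String.singleton char) ""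

-- ===== PORT B =====
-- seven staged replace passes; '\x00' is the sentinel for the two swaps
def apply_qwertz_mapping_py_alt (text : String) : String :=
  let s := PySem.Str.replace (PySem.Str.replace (PySem.Str.replace text "y" "\x00") "z" "y") "\x00" "z"
  let s := PySem.Str.replace (PySem.Str.replace (PySem.Str.replace s "Y" "\x00") "Z" "Y") "\x00" "Z"
  PySem.Str.replace s "'" "#"

-- ===== PRECONDITION & SPEC =====
def Spec_apply_qwertz_mapping_py (text : String) (out : String) : Prop := out = apply_qwertz_mapping_py_alt text
instance (text : String) (out : String) : Decidable (Spec_apply_qwertz_mapping_py text out) := by unfold Spec_apply_qwertz_mapping_py; infer_instance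

-- ===== CLAIM (what is proved, stated in full; the proofs are below) =====
def Claim_equal_apply_qwertz_mapping_py : Prop := ∀ (text : String), Dom_apply_qwertz_mapping_py text → Spec_apply_qwertz_mapping_py text (apply_qwertz_mapping_py text)

-- ===== LEMMAS AND PROOFS =====

-- substitution of a single character (what one replace pass does per character)
def pvSub (a b c : Char) : Char := if c = a then b else c

-- the piece A appends for one character, as a string
def pvStepA (char : Char) : String :=
  if PySem.Chars.lowerChar char == 'y' then
    (if PySem.Chars.islower char then "z" else "Z")
  else if PySem.Chars.lowerChar char == 'z' then
    (if PySem.Chars.islower char then "y" else "Y")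
  else if char == '\'' then "#"
  else String.singleton char

-- the same piece as a single character
def pvFA (c : Char) : Char :=
  if PySem.Chars.lowerChar c == 'y' then (if PySem.Chars.islower c then 'z' else 'Z')
  else if PySem.Chars.lowerChar c == 'z' then (if PySem.Chars.islower c then 'y' else 'Y')
  else if c = '\'' then '#' else c

lemma pvStepA_toList (c : Char) (h : c.toNat ≤ 126) :
    (pvStepA c).toList = [pvFA c] := by
  have h2 : Char.ofNat c.toNat = c := Char.ofNat_toNat c
  have key : ∀ n ∈ Finset.range 127,
      (pvStepA (Char.ofNat n)).toList = [pvFA (Char.ofNat n)] := by decide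
  have := key c.toNat (Finset.mem_range.mpr (by omega))
  rwa [h2] at this

-- A's foldl, characterised as a map over the characters
lemma pv_foldl_toList (l : List Char) (h : ∀ c ∈ l, c.toNat ≤ 126) (acc : String) :
    (l.foldl (fun modified_text char =>
      if PySem.Chars.lowerChar char == 'y' then
        modified_text ++ (if PySem.Chars.islower char then "z" else "Z")
      else if PySem.Chars.lowerChar char == 'z' then
        modified_text ++ (if PySem.Chars.islower char then "y" else "Y")
      else if char == '\'' then
        modified_text ++ "#"
      else
        modified_text ++ String.singleton char) acc).toList
    = acc.toList ++ l.map pvFA := by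
  induction l generalizing acc with
  | nil => simp
  | cons c t ih =>
    have hc : c.toNat ≤ 126 := h c (by simp)
    have hstep : (if PySem.Chars.lowerChar c == 'y' then
        acc ++ (if PySem.Chars.islower c then "z" else "Z")
      else if PySem.Chars.lowerChar c == 'z' then
        acc ++ (if PySem.Chars.islower c then "y" else "Y")
      else if c == '\'' then acc ++ "#"
      else acc ++ String.singleton c) = acc ++ pvStepA c := by
      unfold pvStepA; split_ifs <;> rfl
    have ht : ∀ x ∈ t, x.toNat ≤ 126 := fun x hx => h x (List.mem_cons_of_mem c hx)
    rw [List.foldl_cons, hstep, ih ht, String.toList_append, pvStepA_toList c hc]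
    simp

-- a replace pass with a one-character pattern is a character substitution map
lemma pv_replace_go_single (a b : Char) :
    ∀ (fuel : Nat) (l acc : List Char), l.length ≤ fuel →
    PySem.Chars.replace.go [a] [b] fuel l acc
      = acc.reverse ++ l.map (pvSub a b) := by
  intro fuel
  induction fuel with
  | zero =>
    intro l acc hl
    have : l = [] := List.eq_nil_of_length_eq_zero (Nat.le_zero.mp hl)
    subst this; simp [PySem.Chars.replace.go]
  | succ n ih =>
    intro l acc hl
    cases l with
    | nil => simp [PySem.Chars.replace.go]
    | cons c t =>
      have ht : t.length ≤ n := by simpa using hl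
      by_cases hca : c = a
      · subst hca
        have hpre : [c].isPrefixOf (c :: t) = true := by
          simp [List.isPrefixOf]
        simp only [PySem.Chars.replace.go, hpre, if_true]
        rw [ih _ _ (by simpa using ht)]
        simp [pvSub]
      · have hpre : [a].isPrefixOf (c :: t) = false := by
          simp [List.isPrefixOf, Ne.symm hca]
        simp only [PySem.Chars.replace.go, hpre]
        rw [if_neg (by simp), ih _ _ ht]
        simp [pvSub, hca]

lemma pv_replace_single (a b : Char) (l : List Char) :
    PySem.Chars.replace l [a] [b] = l.map (pvSub a b) := by
  unfold PySem.Chars.replace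
  rw [if_neg (by simp), pv_replace_go_single a b l.length l [] (le_refl _)]
  simp

-- the composed effect of B's seven passes on one character
def pvChain (c : Char) : Char :=
  pvSub '\'' '#' (pvSub '\x00' 'Z' (pvSub 'Z' 'Y' (pvSub 'Y' '\x00'
    (pvSub '\x00' 'z' (pvSub 'z' 'y' (pvSub 'y' '\x00' c))))))

-- on domain characters (in particular ≠ '\x00') the chain agrees with A's step
lemma pvChain_eq_pvFA (c : Char) (h1 : 1 ≤ c.toNat) (h2 : c.toNat ≤ 126) :
    pvChain c = pvFA c := by
  have hofn : Char.ofNat c.toNat = c := Char.ofNat_toNat c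
  have key : ∀ n ∈ Finset.range 127, 1 ≤ n →
      pvChain (Char.ofNat n) = pvFA (Char.ofNat n) := by decide
  have := key c.toNat (Finset.mem_range.mpr (by omega)) h1
  rwa [hofn] at this

-- the seven maps collapsed over a domain list, by induction using pvChain_eq_pvFA
lemma pv_maps_eq (l : List Char) (h : ∀ c ∈ l, 1 ≤ c.toNat ∧ c.toNat ≤ 126) :
    ((((((l.map (pvSub 'y' '\x00')).map (pvSub 'z' 'y')).map (pvSub '\x00' 'z')).map
        (pvSub 'Y' '\x00')).map (pvSub 'Z' 'Y')).map (pvSub '\x00' 'Z')).map (pvSub '\'' '#')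
      = l.map pvFA := by
  induction l with
  | nil => rfl
  | cons c t ih =>
    simp only [List.map_cons, List.cons.injEq]
    refine ⟨?_, ih (fun x hx => h x (List.mem_cons_of_mem c hx))⟩
    have hc := h c (by simp)
    exact pvChain_eq_pvFA c hc.1 hc.2

theorem apply_qwertz_mapping_py_spec : Claim_equal_apply_qwertz_mapping_py := by
  intro text hdom
  unfold Spec_apply_qwertz_mapping_py apply_qwertz_mapping_py apply_qwertz_mapping_py_alt
  have hdc : ∀ c ∈ text.toList, 1 ≤ c.toNat ∧ c.toNat ≤ 126 := by
    intro c hc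
    have := List.all_eq_true.mp hdom c hc
    simp [pvDomChar] at this
    omega
  apply String.ext
  rw [pv_foldl_toList text.toList (fun c hc => (hdc c hc).2) ""]
  simp only [PySem.Str.toList_replace]
  rw [(show ("y":String).toList = ['y'] from rfl),
      (show ("z":String).toList = ['z'] from rfl),
      (show ("Y":String).toList = ['Y'] from rfl),
      (show ("Z":String).toList = ['Z'] from rfl),
      (show ("\x00":String).toList = ['\x00'] from rfl),
      (show ("'":String).toList = ['\''] from rfl),
      (show ("#":String).toList = ['#'] from rfl)]
  simp only [pv_replace_single]
  rw [pv_maps_eq text.toList hdc]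
  simp
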